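-- pv_equiv track=rewrite | github.com/Kirill-Kiselev/vehicles-detection | src/utils/intervals_functions.py | find_true_intervals
-- ===== SOURCE A (Python) =====
-- def find_true_intervals(lst: list) -> list:
--     intervals = []
--     current_interval = []
--
--     for i, value in enumerate(lst):
--         if value:
--             if not current_interval:
--                 current_interval.append(i)
--         elif current_interval:
--             current_interval.append(i - 1)
--             intervals.append(current_interval)
--             current_interval = []
--
--     if current_interval:
--         current_interval.append(len(lst) - 1)
--         intervals.append(current_interval)
--
--     return intervals
-- ===== SOURCE B (Python) =====
-- def find_true_intervals(lst: list) -> list: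
--     res = []
--     n = len(lst)
--     i = 0
--     while i < n:
--         if lst[i]:
--             j = i + 1
--             while j < n and lst[j]:
--                 j += 1
--             res.append([i, j - 1])
--             i = j
--         else:
--             i += 1
--     return res
-- ===== Notes on version B (the rewrite author's own statement) =====
-- stated objective: alternative
-- what changed: Replaces A's enumerate pass that carries a partially-built current_interval list (with a post-loop flush) by a run-scanning while loop: on each truthy element an inner scan finds the end of the run and emits the complete interval at once, so no pending-interval state or final flush exists.
import Mathlib
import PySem

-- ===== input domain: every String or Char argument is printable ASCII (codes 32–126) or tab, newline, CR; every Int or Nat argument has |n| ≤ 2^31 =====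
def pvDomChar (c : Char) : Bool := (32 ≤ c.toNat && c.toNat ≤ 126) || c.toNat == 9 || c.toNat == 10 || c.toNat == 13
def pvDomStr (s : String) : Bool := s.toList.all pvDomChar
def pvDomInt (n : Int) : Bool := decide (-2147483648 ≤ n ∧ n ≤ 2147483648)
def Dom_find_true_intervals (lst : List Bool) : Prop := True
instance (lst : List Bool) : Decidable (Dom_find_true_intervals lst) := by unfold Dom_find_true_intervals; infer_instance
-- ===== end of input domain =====

-- B replaces A's pending-interval accumulator (and its post-loop flush) by a run scanner
-- that finds each maximal true-run with an inner scan and emits its interval at once;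
-- same O(n) cost, equivalence proved on all inputs.

-- ===== PORT A =====
-- one step of A's for-loop: state = (intervals, current_interval)
def ftiStepA (st : List (List Int) × List Int) (p : Int × Bool) : List (List Int) × List Int :=
  if p.2 then
    (if st.2.isEmpty then (st.1, st.2 ++ [p.1]) else st)
  else if ¬ st.2.isEmpty then
    (st.1 ++ [st.2 ++ [p.1 - 1]], [])
  else st

def find_true_intervals (lst : List Bool) : List (List Int) :=
  let st := (PySem.List.enumerate lst).foldl ftiStepA ([], [])
  if ¬ st.2.isEmpty then st.1 ++ [st.2 ++ [(lst.length : Int) - 1]] else st.1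

-- ===== PORT B =====
-- inner while loop of B: how many leading elements of the remaining suffix are true
def ftiRun : List Bool → Nat
  | true :: rest => ftiRun rest + 1
  | _ => 0

-- outer while loop of B: structural recursion on the unprocessed suffix, i = its start index
def ftiGo : List Bool → Int → List (List Int)
  | [], _ => []
  | b :: rest, i =>
    if b then
      [i, i + (ftiRun rest : Int)] :: ftiGo (rest.drop (ftiRun rest)) (i + (ftiRun rest : Int) + 1)
    else
      ftiGo rest (i + 1)
termination_by t => t.length
decreasing_by all_goals (simp [List.length_drop]; try omega)

def find_true_intervals_alt (lst : List Bool) : List (List Int) := ftiGo lst 0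

-- ===== PRECONDITION & SPEC =====
def Spec_find_true_intervals (lst : List Bool) (out : List (List Int)) : Prop := out = find_true_intervals_alt lst
instance (lst : List Bool) (out : List (List Int)) : Decidable (Spec_find_true_intervals lst out) := by unfold Spec_find_true_intervals; infer_instance

-- ===== CLAIM (what is proved, stated in full; the proofs are below) =====
def Claim_equal_find_true_intervals : Prop := ∀ (lst : List Bool), Dom_find_true_intervals lst → Spec_find_true_intervals lst (find_true_intervals lst)

-- ===== LEMMAS AND PROOFS =====

-- A's finishing flush, with n = original length
def ftiFin (st : List (List Int) × List Int) (n : Int) : List (List Int) :=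
  if ¬ st.2.isEmpty then st.1 ++ [st.2 ++ [n - 1]] else st.1

-- main invariant, both loop states at once:
-- outside a run (cur = []) the fold-then-flush equals acc ++ ftiGo t i;
-- inside a run started at s it equals acc with the run's interval closed at i + ftiRun t - 1
-- followed by ftiGo on what remains after the run.
theorem ftiMain (t : List Bool) : ∀ (i : Int) (acc : List (List Int)),
    (ftiFin ((PySem.List.enumerate t i).foldl ftiStepA (acc, [])) (i + t.length) = acc ++ ftiGo t i)
    ∧ (∀ s : Int,
        ftiFin ((PySem.List.enumerate t i).foldl ftiStepA (acc, [s])) (i + t.length)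
          = acc ++ ([s, i + (ftiRun t : Int) - 1] :: ftiGo (t.drop (ftiRun t)) (i + (ftiRun t : Int)))) := by
  induction t with
  | nil =>
    intro i acc
    constructor
    · simp [PySem.List.enumerate, ftiFin, ftiGo]
    · intro s; simp [PySem.List.enumerate, ftiFin, ftiGo, ftiRun]
  | cons b rest ih =>
    intro i acc
    constructor
    · cases b with
      | false =>
        have h := (ih (i + 1) acc).1
        simp [PySem.List.enumerate_cons, ftiStepA, ftiGo] at h ⊢
        rw [show (i + ((rest.length : Int) + 1)) = (i + 1 + rest.length) by ring]
        exact h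
      | true =>
        have h := (ih (i + 1) acc).2 i
        simp [PySem.List.enumerate_cons, ftiStepA, ftiGo] at h ⊢
        rw [show (i + ((rest.length : Int) + 1)) = (i + 1 + rest.length) by ring,
            show (i + (ftiRun rest : Int)) = (i + 1 + (ftiRun rest : Int) - 1) by ring,
            show (i + 1 + (ftiRun rest : Int) - 1 + 1) = (i + 1 + (ftiRun rest : Int)) by ring]
        exact h
    · intro s
      cases b with
      | false =>
        have h := (ih (i + 1) (acc ++ [[s, i - 1]])).1
        simp [PySem.List.enumerate_cons, ftiStepA, ftiRun] at h ⊢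
        rw [show (i + ((rest.length : Int) + 1)) = (i + 1 + rest.length) by ring, h]
        simp [ftiGo]
      | true =>
        have h := (ih (i + 1) acc).2 s
        simp [PySem.List.enumerate_cons, ftiStepA, ftiRun] at h ⊢
        rw [show (i + ((rest.length : Int) + 1)) = (i + 1 + rest.length) by ring,
            show (i + ((ftiRun rest : Int) + 1) - 1) = (i + 1 + (ftiRun rest : Int) - 1) by ring,
            show (i + ((ftiRun rest : Int) + 1)) = (i + 1 + (ftiRun rest : Int)) by ring]
        exact h

-- ===== VERDICT (by name: the statement is the Claim_ definition above) =====
theorem find_true_intervals_spec : Claim_equal_find_true_intervals := by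
  intro lst _
  unfold Spec_find_true_intervals find_true_intervals find_true_intervals_alt
  have h := (ftiMain lst 0 []).1
  simpa [ftiFin] using h
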